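-- pv_equiv track=rewrite | github.com/Rainy-W-cy/CropCd-BCF_Analysis2 | src_bak/corr_advanced.py | _heuristic_order
-- ===== SOURCE A (Python) =====
-- from typing import Dict, List, Optional, Tuple
--
-- def _heuristic_order(cols: List[str]) -> List[str]:
--     """Make a more 'paper-like' order without needing user to specify."""
--     def pick(keys):
--         out=[]
--         for k in keys:
--             for c in cols:
--                 if c.lower() == k.lower() and c not in out:
--                     out.append(c)
--         return out
--
--     # common soil/agri variables (best-effort)
--     head = pick(["bcf","bcf_calc","soil_cd","soil_cd_mgkg","crop_cd","crop_cd_mgkg","cd","ph","pH","som","cec"])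
--     texture = pick(["clay","clay_content","particle","particle_content","sand","sand_content","water","water_content","bulk","bulk_density"])
--     nutrients = pick(["n","p","k","mn","zn","cu","fe"])
--     geo = pick(["altitude","elevation","geology","soil_type","land_use","land_use_type","vegetation","vegetation_cover_type","distance","distance_from_pollution_source","x","y","lon","lat"])
--     ordered = head + texture + nutrients + geo
--     # append remaining
--     for c in cols:
--         if c not in ordered:
--             ordered.append(c)
--     return ordered
-- ===== SOURCE B (Python) =====
-- # B: single dedup pass + bucket distribution by key rank (counting-sort style),
-- # replacing A's per-key rescans of cols with incremental membership tests.
--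
-- _PRIORITY_KEYS = [
--     "bcf", "bcf_calc", "soil_cd", "soil_cd_mgkg", "crop_cd", "crop_cd_mgkg",
--     "cd", "ph", "som", "cec",
--     "clay", "clay_content", "particle", "particle_content", "sand",
--     "sand_content", "water", "water_content", "bulk", "bulk_density",
--     "n", "p", "k", "mn", "zn", "cu", "fe",
--     "altitude", "elevation", "geology", "soil_type", "land_use",
--     "land_use_type", "vegetation", "vegetation_cover_type", "distance",
--     "distance_from_pollution_source", "x", "y", "lon", "lat",
-- ]
--
-- def _rank(lc):
--     for i, k in enumerate(_PRIORITY_KEYS):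
--         if k == lc:
--             return i
--     return len(_PRIORITY_KEYS)
--
-- def _heuristic_order(cols):
--     seen = set()
--     dedup = []
--     for c in cols:
--         if c not in seen:
--             seen.add(c)
--             dedup.append(c)
--     buckets = [[] for _ in range(len(_PRIORITY_KEYS) + 1)]
--     for c in dedup:
--         buckets[_rank(c.lower())].append(c)
--     out = []
--     for b in buckets:
--         out.extend(b)
--     return out
-- ===== Notes on version B (the rewrite author's own statement) =====
-- stated objective: faster
-- what changed: Replaces A's per-key rescans of cols with quadratic list-membership dedup ('c not in out'/'c not in ordered') by one set-based dedup pass followed by a counting-sort-style distribution of the deduped columns into rank buckets (one bucket per distinct lowercased priority key plus a trailing bucket) that are concatenated.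
import Mathlib
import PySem

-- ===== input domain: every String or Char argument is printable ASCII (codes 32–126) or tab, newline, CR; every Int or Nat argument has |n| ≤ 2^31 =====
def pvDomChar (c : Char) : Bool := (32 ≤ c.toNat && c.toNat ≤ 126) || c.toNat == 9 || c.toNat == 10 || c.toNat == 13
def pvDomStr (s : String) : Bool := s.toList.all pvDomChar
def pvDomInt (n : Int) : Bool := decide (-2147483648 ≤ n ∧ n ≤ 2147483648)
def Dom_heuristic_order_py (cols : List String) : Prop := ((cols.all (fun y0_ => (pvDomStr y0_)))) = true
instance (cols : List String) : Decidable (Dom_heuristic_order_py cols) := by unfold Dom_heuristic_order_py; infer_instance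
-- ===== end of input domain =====

-- B replaces A's per-key rescans (with quadratic 'not in out' list-membership dedup
-- and a trailing remaining-scan) by one set-based dedup pass and a counting-sort-style
-- distribution of the deduped columns into rank buckets that are concatenated
-- (objective: faster; a timing run measured B faster).

-- ===== PORT A =====
-- inner helper 'pick' of A (closes over cols)
def pvPick (cols : List String) (keys : List String) : List String :=
  keys.foldl (fun out k =>
    cols.foldl (fun out c =>
      if PySem.Str.lower c = PySem.Str.lower k ∧ c ∉ out then out ++ [c] else out) out) []

def heuristic_order_py (cols : List String) : List String :=
  let head := pvPick cols ["bcf", "bcf_calc", "soil_cd", "soil_cd_mgkg", "crop_cd", "crop_cd_mgkg", "cd", "ph", "pH", "som", "cec"]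
  let texture := pvPick cols ["clay", "clay_content", "particle", "particle_content", "sand", "sand_content", "water", "water_content", "bulk", "bulk_density"]
  let nutrients := pvPick cols ["n", "p", "k", "mn", "zn", "cu", "fe"]
  let geo := pvPick cols ["altitude", "elevation", "geology", "soil_type", "land_use", "land_use_type", "vegetation", "vegetation_cover_type", "distance", "distance_from_pollution_source", "x", "y", "lon", "lat"]
  let ordered := head ++ texture ++ nutrients ++ geo
  cols.foldl (fun ordered c => if c ∉ ordered then ordered ++ [c] else ordered) ordered

-- ===== PORT B =====
def pvPriorityKeys : List String :=
  ["bcf", "bcf_calc", "soil_cd", "soil_cd_mgkg", "crop_cd", "crop_cd_mgkg",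
   "cd", "ph", "som", "cec",
   "clay", "clay_content", "particle", "particle_content", "sand",
   "sand_content", "water", "water_content", "bulk", "bulk_density",
   "n", "p", "k", "mn", "zn", "cu", "fe",
   "altitude", "elevation", "geology", "soil_type", "land_use",
   "land_use_type", "vegetation", "vegetation_cover_type", "distance",
   "distance_from_pollution_source", "x", "y", "lon", "lat"]

-- Source B's _rank: linear scan with early return; falls through to the list length
def pvRankGo (lc : String) : List String → Nat
  | [] => 0
  | k :: rest => if k = lc then 0 else pvRankGo lc rest + 1

def pvRank (lc : String) : Nat := pvRankGo lc pvPriorityKeys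

def heuristic_order_py_alt (cols : List String) : List String :=
  let dedup := (cols.foldl (fun (st : PySem.Set String × List String) c =>
      if st.1.contains c then st else (PySem.Set.add st.1 c, st.2 ++ [c]))
      (PySem.Set.empty, [])).2
  let buckets := dedup.foldl
      (fun bk c => bk.modify (pvRank (PySem.Str.lower c)) (fun b => b ++ [c]))
      (List.replicate (pvPriorityKeys.length + 1) [])
  buckets.foldl (fun out b => out ++ b) []

-- ===== PRECONDITION & SPEC =====
def Spec_heuristic_order_py (cols : List String) (out : List String) : Prop := out = heuristic_order_py_alt cols
instance (cols : List String) (out : List String) : Decidable (Spec_heuristic_order_py cols out) := by unfold Spec_heuristic_order_py; infer_instance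

-- ===== CLAIM (what is proved, stated in full; the proofs are below) =====
def Claim_equal_heuristic_order_py : Prop := ∀ (cols : List String), Dom_heuristic_order_py cols → Spec_heuristic_order_py cols (heuristic_order_py cols)

-- ===== LEMMAS AND PROOFS =====

def pvG (cs : List String) (k : String) : List String :=
  cs.filter (fun c => decide (PySem.Str.lower c = PySem.Str.lower k))

lemma pv_mem_flatMap_pvG (cs : List String) (ks : List String) (x : String) :
    x ∈ ks.flatMap (pvG cs) ↔ x ∈ cs ∧ PySem.Str.lower x ∈ ks.map PySem.Str.lower := by
  simp only [pvG, List.mem_flatMap, List.mem_filter, List.mem_map, decide_eq_true_eq]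
  constructor
  · rintro ⟨k, hk, hx, he⟩; exact ⟨hx, k, hk, he.symm⟩
  · rintro ⟨hx, k, hk, he⟩; exact ⟨k, hk, hx, he.symm⟩

lemma pv_ofList_append_of_disjoint (a b : List String) (h : ∀ x ∈ b, x ∉ a) :
    PySem.Set.ofList (a ++ b) = PySem.Set.ofList a ++ PySem.Set.ofList b := by
  rw [PySem.Set.ofList_append, PySem.Set.update_eq_append_filter]
  congr 1
  apply List.filter_eq_self.mpr
  intro y hy
  have : y ∉ PySem.Set.ofList a := by
    rw [PySem.Set.mem_ofList]; exact h y ((PySem.Set.mem_ofList _ _).mp hy)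
  simp [PySem.Set.contains, this]

lemma pv_update_self (s x : List String) :
    PySem.Set.update (PySem.Set.update s x) x = PySem.Set.update s x := by
  conv_lhs => rw [PySem.Set.update_eq_append_filter]
  have : List.filter (fun y => !(PySem.Set.update s x).contains y) (PySem.Set.ofList x) = [] := by
    rw [List.filter_eq_nil_iff]
    intro y hy
    have : y ∈ PySem.Set.update s x :=
      (PySem.Set.mem_update _ _ _).mpr (Or.inr ((PySem.Set.mem_ofList _ _).mp hy))
    simp [PySem.Set.contains, this]
  rw [this, List.append_nil]

lemma pv_ofList_filter (p : String → Bool) (l : List String) :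
    PySem.Set.ofList (l.filter p) = (PySem.Set.ofList l).filter p := by
  induction l with
  | nil => rfl
  | cons x l ih =>
    by_cases hp : p x
    · rw [List.filter_cons_of_pos hp, PySem.Set.ofList_cons, PySem.Set.ofList_cons, ih,
        List.filter_cons_of_pos hp]
      simp only [PySem.Set.discard, List.filter_filter]
      congr 1
      exact List.filter_congr (fun y _ => Bool.and_comm _ _)
    · rw [List.filter_cons_of_neg hp, ih, PySem.Set.ofList_cons, List.filter_cons_of_neg hp]
      simp only [PySem.Set.discard, List.filter_filter]
      apply List.filter_congr
      intro y _
      cases hpy : p y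
      · simp
      · simp only [Bool.true_and]
        have : ¬ (y == x) := by
          intro he
          exact hp (by rwa [← eq_of_beq he])
        simp [this]

lemma pv_ofList_flatMap (cols : List String) :
    ∀ ks : List String, (ks.map PySem.Str.lower).Nodup →
    PySem.Set.ofList (ks.flatMap (pvG cols)) = ks.flatMap (pvG (PySem.Set.ofList cols)) := by
  intro ks
  induction ks with
  | nil => intro _; rfl
  | cons k ks ih =>
    intro hnd
    have hnd2 := hnd
    simp only [List.map_cons, List.nodup_cons, List.mem_map] at hnd2
    have hk : PySem.Str.lower k ∉ ks.map PySem.Str.lower := by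
      rw [List.mem_map]
      rintro ⟨x, hx, he⟩
      exact hnd2.1 ⟨x, hx, by simpa using he⟩
    have hnd' : (ks.map PySem.Str.lower).Nodup := hnd2.2
    simp only [List.flatMap_cons]
    rw [PySem.Set.ofList_append, PySem.Set.update_eq_append_filter, ih hnd']
    congr 1
    · simp only [pvG]
      exact pv_ofList_filter _ _
    · apply List.filter_eq_self.mpr
      intro y hy
      have hmem := (pv_mem_flatMap_pvG (PySem.Set.ofList cols) ks y).mp hy
      have hne : y ∉ PySem.Set.ofList (pvG cols k) := by
        rw [PySem.Set.mem_ofList]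
        intro hyk
        have : PySem.Str.lower y = PySem.Str.lower k := by
          simp only [pvG, List.mem_filter, decide_eq_true_eq] at hyk
          exact hyk.2
        exact hk (this ▸ hmem.2)
      simp [PySem.Set.contains, hne]

lemma pv_stepA (cols : List String) (k : String) (out : List String) :
    cols.foldl (fun out c =>
      if PySem.Str.lower c = PySem.Str.lower k ∧ c ∉ out then out ++ [c] else out) out
    = PySem.Set.update out (pvG cols k) := by
  have h : (fun (out : List String) c =>
        if PySem.Str.lower c = PySem.Str.lower k ∧ c ∉ out then out ++ [c] else out)
      = fun out c => if PySem.Str.lower c = PySem.Str.lower k then PySem.Set.add out c else out := by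
    funext out c
    by_cases h1 : PySem.Str.lower c = PySem.Str.lower k
    · by_cases h2 : c ∈ out <;>
        simp [h1, h2, PySem.Set.add, PySem.Set.contains]
    · simp [h1]
  rw [h, PySem.List.foldl_ite_eq_foldl_filter
    (p := fun c => PySem.Str.lower c = PySem.Str.lower k) (f := PySem.Set.add)]
  rfl

lemma pv_pick_aux (cols : List String) :
    ∀ (keys : List String) (s : PySem.Set String),
    keys.foldl (fun out k => cols.foldl (fun out c =>
      if PySem.Str.lower c = PySem.Str.lower k ∧ c ∉ out then out ++ [c] else out) out) s
    = PySem.Set.update s (keys.flatMap (pvG cols)) := by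
  intro keys
  induction keys with
  | nil => intro s; rfl
  | cons k ks ih =>
    intro s
    simp only [List.foldl_cons, List.flatMap_cons]
    rw [pv_stepA, ih, ← PySem.Set.update_append]

lemma pv_pick_eq (cols keys : List String) :
    pvPick cols keys = PySem.Set.ofList (keys.flatMap (pvG cols)) := by
  unfold pvPick
  rw [pv_pick_aux]
  rfl

lemma pv_stepFinal (cols : List String) (s : List String) :
    cols.foldl (fun o c => if c ∉ o then o ++ [c] else o) s = PySem.Set.update s cols := by
  have h : (fun (o : List String) c => if c ∉ o then o ++ [c] else o)
      = fun o c => PySem.Set.add o c := by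
    funext o c
    by_cases h2 : c ∈ o <;> simp [h2, PySem.Set.add, PySem.Set.contains]
  rw [h]
  rfl

lemma pv_gph (cols : List String) : pvG cols "pH" = pvG cols "ph" := by
  simp [pvG, show PySem.Str.lower "pH" = "ph" from by decide,
    show PySem.Str.lower "ph" = "ph" from by decide]

lemma pv_disj (cols : List String) (ka kb : List String)
    (h : ∀ l ∈ kb.map PySem.Str.lower, l ∉ ka.map PySem.Str.lower) :
    ∀ x ∈ kb.flatMap (pvG cols), x ∉ ka.flatMap (pvG cols) := by
  intro x hx hxa
  exact h _ ((pv_mem_flatMap_pvG cols kb x).mp hx).2 ((pv_mem_flatMap_pvG cols ka x).mp hxa).2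

lemma pv_A_canon (cols : List String) :
    heuristic_order_py cols
    = pvPriorityKeys.flatMap (pvG (PySem.Set.ofList cols))
      ++ (PySem.Set.ofList cols).filter
          (fun c => decide (PySem.Str.lower c ∉ pvPriorityKeys)) := by
  simp only [heuristic_order_py, pv_pick_eq, pv_stepFinal]
  rw [show (["bcf", "bcf_calc", "soil_cd", "soil_cd_mgkg", "crop_cd", "crop_cd_mgkg", "cd", "ph",
      "pH", "som", "cec"] : List String).flatMap (pvG cols)
    = List.flatMap (pvG cols) ["bcf", "bcf_calc", "soil_cd", "soil_cd_mgkg", "crop_cd",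
      "crop_cd_mgkg", "cd", "ph", "ph", "som", "cec"] from by
      simp only [List.flatMap_cons, List.flatMap_nil, List.append_nil, pv_gph]]
  rw [show PySem.Set.ofList (List.flatMap (pvG cols) ["bcf", "bcf_calc", "soil_cd", "soil_cd_mgkg",
        "crop_cd", "crop_cd_mgkg", "cd", "ph", "ph", "som", "cec"])
      = PySem.Set.ofList (List.flatMap (pvG cols) ["bcf", "bcf_calc", "soil_cd", "soil_cd_mgkg",
        "crop_cd", "crop_cd_mgkg", "cd", "ph", "som", "cec"]) from by
    simp only [List.flatMap_cons, List.flatMap_nil, List.append_nil, PySem.Set.ofList_append,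
      PySem.Set.update_append, pv_update_self]]
  rw [← pv_ofList_append_of_disjoint _ _ (pv_disj cols
        ["bcf", "bcf_calc", "soil_cd", "soil_cd_mgkg", "crop_cd", "crop_cd_mgkg", "cd", "ph", "som", "cec"]
        ["clay", "clay_content", "particle", "particle_content", "sand", "sand_content", "water",
         "water_content", "bulk", "bulk_density"] (by decide)),
      ← List.flatMap_append]
  rw [← pv_ofList_append_of_disjoint _ _ (pv_disj cols
        (["bcf", "bcf_calc", "soil_cd", "soil_cd_mgkg", "crop_cd", "crop_cd_mgkg", "cd", "ph", "som", "cec"] ++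
         ["clay", "clay_content", "particle", "particle_content", "sand", "sand_content", "water",
          "water_content", "bulk", "bulk_density"])
        ["n", "p", "k", "mn", "zn", "cu", "fe"] (by decide)),
      ← List.flatMap_append]
  rw [← pv_ofList_append_of_disjoint _ _ (pv_disj cols
        ((["bcf", "bcf_calc", "soil_cd", "soil_cd_mgkg", "crop_cd", "crop_cd_mgkg", "cd", "ph", "som", "cec"] ++
          ["clay", "clay_content", "particle", "particle_content", "sand", "sand_content", "water",
           "water_content", "bulk", "bulk_density"]) ++
         ["n", "p", "k", "mn", "zn", "cu", "fe"])
        ["altitude", "elevation", "geology", "soil_type", "land_use", "land_use_type", "vegetation",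
         "vegetation_cover_type", "distance", "distance_from_pollution_source", "x", "y", "lon", "lat"]
        (by decide)),
      ← List.flatMap_append]
  rw [PySem.Set.update_eq_append_filter]
  rw [show ((((["bcf", "bcf_calc", "soil_cd", "soil_cd_mgkg", "crop_cd", "crop_cd_mgkg", "cd", "ph", "som", "cec"] ++
          ["clay", "clay_content", "particle", "particle_content", "sand", "sand_content", "water",
           "water_content", "bulk", "bulk_density"]) ++
         ["n", "p", "k", "mn", "zn", "cu", "fe"]) ++
        ["altitude", "elevation", "geology", "soil_type", "land_use", "land_use_type", "vegetation",
         "vegetation_cover_type", "distance", "distance_from_pollution_source", "x", "y", "lon", "lat"]) : List String)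
      = pvPriorityKeys from rfl]
  rw [pv_ofList_flatMap cols pvPriorityKeys (by decide)]
  congr 1
  apply List.filter_congr
  intro y hy
  have hyc : y ∈ cols := (PySem.Set.mem_ofList _ _).mp hy
  have hmem : y ∈ pvPriorityKeys.flatMap (pvG (PySem.Set.ofList cols))
      ↔ PySem.Str.lower y ∈ pvPriorityKeys := by
    rw [pv_mem_flatMap_pvG, show pvPriorityKeys.map PySem.Str.lower = pvPriorityKeys from by decide]
    simp [hy]
  by_cases hm : PySem.Str.lower y ∈ pvPriorityKeys
  · have : y ∈ pvPriorityKeys.flatMap (pvG (PySem.Set.ofList cols)) := hmem.mpr hm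
    simp [PySem.Set.contains, this, hm]
  · have : y ∉ pvPriorityKeys.flatMap (pvG (PySem.Set.ofList cols)) := fun h => hm (hmem.mp h)
    simp [PySem.Set.contains, this, hm]

lemma pv_dedup_loop (cols : List String) :
    ∀ s : PySem.Set String,
    cols.foldl (fun (st : PySem.Set String × List String) c =>
        if st.1.contains c then st else (PySem.Set.add st.1 c, st.2 ++ [c])) (s, s)
    = (PySem.Set.update s cols, PySem.Set.update s cols) := by
  induction cols with
  | nil => intro s; rfl
  | cons c cs ih =>
    intro s
    simp only [List.foldl_cons]
    by_cases hc : c ∈ s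
    · have hcc : PySem.Set.contains s c = true := (PySem.Set.contains_iff _ _).mpr hc
      have hadd : PySem.Set.add s c = s := by simp [PySem.Set.add, hc]
      simp only [hcc, if_true, PySem.Set.update_cons, hadd]
      exact ih s
    · have hcc : PySem.Set.contains s c = false := by
        rw [Bool.eq_false_iff]; intro h; exact hc ((PySem.Set.contains_iff _ _).mp h)
      have hadd : PySem.Set.add s c = s ++ [c] := by simp [PySem.Set.add, hc]
      simp only [hcc, Bool.false_eq_true, if_false, PySem.Set.update_cons, hadd]
      have := ih (s ++ [c])
      rw [← hadd] at this ⊢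
      exact this

lemma pv_rankGo_notmem (lc : String) : ∀ ks : List String, lc ∉ ks → pvRankGo lc ks = ks.length := by
  intro ks
  induction ks with
  | nil => intro _; rfl
  | cons k ks ih =>
    intro h
    have hk : k ≠ lc := fun he => h (he ▸ List.mem_cons_self)
    simp [pvRankGo, hk, ih (fun hm => h (List.mem_cons_of_mem _ hm))]

lemma pv_rankGo_lt (lc : String) : ∀ ks : List String, lc ∈ ks → pvRankGo lc ks < ks.length := by
  intro ks
  induction ks with
  | nil => intro h; cases h
  | cons k ks ih =>
    intro h
    by_cases hk : k = lc
    · simp [pvRankGo, hk]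
    · have : lc ∈ ks := by
        cases h with
        | head => exact absurd rfl hk
        | tail _ hm => exact hm
      simp only [pvRankGo, hk, if_false, List.length_cons]
      exact Nat.succ_lt_succ (ih this)

lemma pv_rankGo_eq_iff (lc : String) :
    ∀ ks : List String, ks.Nodup → ∀ i : Nat, i < ks.length →
    (pvRankGo lc ks = i ↔ ks.getD i "" = lc) := by
  intro ks
  induction ks with
  | nil => intro _ i hi; cases hi
  | cons k ks ih =>
    intro hnd i hi
    have hknd : k ∉ ks := (List.nodup_cons.mp hnd).1
    cases i with
    | zero =>
      by_cases hk : k = lc <;> simp [pvRankGo, hk]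
    | succ i =>
      have hi' : i < ks.length := by simpa using hi
      by_cases hk : k = lc
      · constructor
        · intro h; simp [pvRankGo, hk] at h
        · intro h
          exfalso
          apply hknd
          have : ks.getD i "" ∈ ks := by
            rw [List.getD_eq_getElem _ _ hi']; exact List.getElem_mem _
          rw [List.getD_cons_succ] at h
          rw [← hk] at h
          exact h ▸ this
      · simp only [pvRankGo, hk, if_false, List.getD_cons_succ, Nat.add_right_cancel_iff]
        exact ih (List.nodup_cons.mp hnd).2 i hi'

lemma pv_addAll_length (r : String → Nat) (xs : List String) :
    ∀ bk : List (List String),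
    (xs.foldl (fun bk c => bk.modify (r c) (fun b => b ++ [c])) bk).length = bk.length := by
  induction xs with
  | nil => intro bk; rfl
  | cons c cs ih =>
    intro bk
    simp only [List.foldl_cons]
    rw [ih, List.length_modify]

lemma pv_addAll_get (r : String → Nat) (xs : List String) :
    ∀ (bk : List (List String)) (i : Nat) (hi : i < bk.length),
    (xs.foldl (fun bk c => bk.modify (r c) (fun b => b ++ [c])) bk)[i]'(by rw [pv_addAll_length]; exact hi)
      = bk[i] ++ xs.filter (fun c => decide (r c = i)) := by
  induction xs with
  | nil => intro bk i hi; simp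
  | cons c cs ih =>
    intro bk i hi
    simp only [List.foldl_cons]
    have hlen : i < (bk.modify (r c) (fun b => b ++ [c])).length := by
      rw [List.length_modify]; exact hi
    rw [ih (bk.modify (r c) (fun b => b ++ [c])) i hlen, List.getElem_modify]
    by_cases h : r c = i
    · simp [h]
    · simp [h]

lemma pv_B_canon (cols : List String) :
    heuristic_order_py_alt cols
    = pvPriorityKeys.flatMap (pvG (PySem.Set.ofList cols))
      ++ (PySem.Set.ofList cols).filter
          (fun c => decide (PySem.Str.lower c ∉ pvPriorityKeys)) := by
  simp only [heuristic_order_py_alt]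
  rw [show ((PySem.Set.empty : PySem.Set String), ([] : List String))
      = ((PySem.Set.empty : PySem.Set String), (PySem.Set.empty : PySem.Set String)) from rfl,
    pv_dedup_loop cols PySem.Set.empty]
  rw [show PySem.Set.update (PySem.Set.empty : PySem.Set String) cols = PySem.Set.ofList cols from rfl]
  rw [PySem.List.foldl_append_eq_flatten, List.nil_append]
  have hbk : (PySem.Set.ofList cols).foldl
      (fun bk c => bk.modify (pvRank (PySem.Str.lower c)) (fun b => b ++ [c]))
      (List.replicate (pvPriorityKeys.length + 1) [])
      = (List.range (pvPriorityKeys.length + 1)).map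
          (fun i => (PySem.Set.ofList cols).filter
            (fun c => decide (pvRank (PySem.Str.lower c) = i))) := by
    apply List.ext_getElem
    · rw [pv_addAll_length]; simp
    · intro i h1 h2
      have hi : i < (List.replicate (pvPriorityKeys.length + 1) ([] : List String)).length := by
        rw [← pv_addAll_length (fun c => pvRank (PySem.Str.lower c)) (PySem.Set.ofList cols)]
        exact h1
      rw [pv_addAll_get (fun c => pvRank (PySem.Str.lower c)) (PySem.Set.ofList cols) _ i hi]
      simp only [List.getElem_replicate, List.nil_append, List.getElem_map, List.getElem_range]
  rw [hbk, List.range_succ, List.map_append, List.flatten_append]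
  simp only [List.map_cons, List.map_nil, List.flatten_cons, List.flatten_nil, List.append_nil]
  rw [List.flatMap_def]
  congr 1
  · -- buckets 0..n-1 are the per-key blocks
    congr 1
    apply List.ext_getElem
    · simp only [List.length_map, List.length_range]
    · intro i h1 h2
      simp only [List.getElem_map, List.getElem_range]
      have hi : i < pvPriorityKeys.length := by simpa using h2
      apply List.filter_congr
      intro c _
      apply decide_eq_decide.mpr
      have hlow : PySem.Str.lower (pvPriorityKeys[i]'hi) = pvPriorityKeys[i]'hi :=
        (show ∀ k ∈ pvPriorityKeys, PySem.Str.lower k = k from by decide) _ (List.getElem_mem hi)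
      rw [show pvRank (PySem.Str.lower c) = pvRankGo (PySem.Str.lower c) pvPriorityKeys from rfl]
      rw [pv_rankGo_eq_iff (PySem.Str.lower c) pvPriorityKeys (by decide) i hi]
      rw [List.getD_eq_getElem _ _ hi, hlow]
      exact eq_comm
  · -- last bucket: the unmatched columns
    apply List.filter_congr
    intro c _
    apply decide_eq_decide.mpr
    rw [show pvRank (PySem.Str.lower c) = pvRankGo (PySem.Str.lower c) pvPriorityKeys from rfl]
    constructor
    · intro h hmem
      have := pv_rankGo_lt (PySem.Str.lower c) pvPriorityKeys hmem
      omega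
    · intro h
      exact pv_rankGo_notmem (PySem.Str.lower c) pvPriorityKeys h

-- ===== VERDICT (by name: the statement is the Claim_ definition above) =====
theorem heuristic_order_py_spec : Claim_equal_heuristic_order_py := by
  intro cols _
  unfold Spec_heuristic_order_py
  rw [pv_A_canon, pv_B_canon]
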